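-- pv_equiv track=rewrite | github.com/terraceonhigh/Aeolia | aeolia-godot/optimization/million_seed_filter.py | assign_factions_bfs
-- ===== SOURCE A (Python) =====
-- from collections import deque
--
-- def assign_factions_bfs(
--     archs: list[dict],
--     plateau_edges: list[list[int]],
--     reach_arch: int,
--     lattice_arch: int,
-- ) -> tuple[list[str], list[list[int]]]:
--     """
--     Returns (factions, adj).
--       factions[i] = "reach" | "lattice"
--       adj[i]      = list of neighbour indices (built from plateau_edges)
--     """
--     N   = len(archs)
--     adj = [[] for _ in range(N)]
--     for edge in plateau_edges:
--         a, b = int(edge[0]), int(edge[1])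
--         adj[a].append(b);  adj[b].append(a)
--
--     dist_r = [999] * N;  dist_r[reach_arch]   = 0
--     dist_l = [999] * N;  dist_l[lattice_arch]  = 0
--
--     def _bfs(start: int, dist: list[int]) -> None:
--         q = deque([start])
--         while q:
--             u = q.popleft()
--             for v in adj[u]:
--                 if dist[v] > dist[u] + 1:
--                     dist[v] = dist[u] + 1
--                     q.append(v)
--
--     _bfs(reach_arch,   dist_r)
--     _bfs(lattice_arch, dist_l)
--
--     factions = ["reach" if dist_r[i] <= dist_l[i] else "lattice" for i in range(N)]
--     return factions, adj
-- ===== SOURCE B (Python) =====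
-- def assign_factions_bfs(
--     archs: list[dict],
--     plateau_edges: list[list[int]],
--     reach_arch: int,
--     lattice_arch: int,
-- ) -> tuple[list[str], list[list[int]]]:
--     N = len(archs)
--     adj = [[] for _ in range(N)]
--     for edge in plateau_edges:
--         a, b = int(edge[0]), int(edge[1])
--         adj[a].append(b)
--         adj[b].append(a)
--
--     # Bellman-Ford-style relaxation to a fixed point: no queue, repeated full
--     # sweeps over all nodes' adjacency lists until no distance improves.
--     def bf_dists(start: int) -> list:
--         dist = [999] * N
--         dist[start] = 0
--         changed = True
--         while changed:
--             changed = False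
--             for u in range(N):
--                 for v in adj[u]:
--                     if dist[u] + 1 < dist[v]:
--                         dist[v] = dist[u] + 1
--                         changed = True
--         return dist
--
--     dist_r = bf_dists(reach_arch)
--     dist_l = bf_dists(lattice_arch)
--     factions = ["reach" if dist_r[i] <= dist_l[i] else "lattice" for i in range(N)]
--     return factions, adj
-- ===== Notes on version B (the rewrite author's own statement) =====
-- stated objective: alternative
-- what changed: Replaces the two deque-based BFS traversals by Bellman-Ford-style fixed-point iteration: repeated full sweeps over every node's adjacency list relaxing dist[v] to dist[u]+1 until a sweep changes nothing (no queue, no frontier); equality holds because both processes are chaotic iterations of the same relaxation system, which has a unique normal form.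
import Mathlib
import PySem

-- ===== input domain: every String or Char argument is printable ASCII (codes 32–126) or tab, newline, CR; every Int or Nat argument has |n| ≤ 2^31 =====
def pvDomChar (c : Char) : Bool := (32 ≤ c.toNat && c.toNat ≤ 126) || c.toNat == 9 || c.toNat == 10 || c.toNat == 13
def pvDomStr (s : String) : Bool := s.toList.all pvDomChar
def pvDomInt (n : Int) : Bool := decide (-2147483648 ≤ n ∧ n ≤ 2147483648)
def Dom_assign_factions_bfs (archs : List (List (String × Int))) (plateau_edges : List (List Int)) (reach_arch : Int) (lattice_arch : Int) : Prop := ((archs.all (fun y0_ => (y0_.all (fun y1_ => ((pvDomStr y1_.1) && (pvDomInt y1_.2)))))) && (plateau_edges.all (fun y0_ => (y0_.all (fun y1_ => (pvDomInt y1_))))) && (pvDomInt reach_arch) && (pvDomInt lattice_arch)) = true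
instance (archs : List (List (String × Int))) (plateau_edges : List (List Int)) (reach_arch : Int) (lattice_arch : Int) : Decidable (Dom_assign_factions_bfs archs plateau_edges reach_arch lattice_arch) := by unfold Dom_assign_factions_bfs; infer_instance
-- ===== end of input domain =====

-- B replaces the two deque BFS traversals by Bellman-Ford-style fixed-point iteration
-- (repeated full sweeps relaxing dist[v] to dist[u]+1 until a sweep changes nothing);
-- same return value, no speed claim.

-- Internal distance arrays are kept as List Nat: every Python value they hold (999, 0,
-- dist[u]+1) is a nonnegative integer, and they are never part of the returned value.

-- termination helpers, cited by the ports' decreasing_by (proofs about the specs are below the claim)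
theorem pvSumSet_lt (l : List Nat) (k : Nat) (a : Nat) (hk : k < l.length) (ha : a < l[k]) :
    (l.set k a).sum < l.sum := by
  induction l generalizing k with
  | nil => simp at hk
  | cons x t ih =>
    cases k with
    | zero => simpa [List.set] using Nat.add_lt_add_right (by simpa using ha) t.sum
    | succ k =>
      have := ih k (by simpa using hk) (by simpa using ha)
      simpa [List.set, Nat.add_lt_add_iff_left] using this

theorem pvIdx_lt {n : Nat} {i : Int} {k : Nat} (h : PySem.List.pyIdx? n i = some k) : k < n := by
  unfold PySem.List.pyIdx? at h
  split_ifs at h with h1 h2 h3 <;> simp_all <;> omega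

theorem pvGetD_none {α : Type} {d : List α} {x : α} {i : Int}
    (h : PySem.List.pyIdx? d.length i = none) : PySem.List.pyGetD d i x = x := by
  simp [PySem.List.pyGetD, PySem.List.pyGet?, h]

theorem pvGetD_some {α : Type} {d : List α} {x : α} {i : Int} {k : Nat}
    (h : PySem.List.pyIdx? d.length i = some k) : PySem.List.pyGetD d i x = d.getD k x := by
  have hk := pvIdx_lt h
  simp [PySem.List.pyGetD, PySem.List.pyGet?, h, List.getElem?_eq_getElem hk, List.getD]

theorem pvSetD_some {α : Type} {d : List α} {x : α} {i : Int} {k : Nat}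
    (h : PySem.List.pyIdx? d.length i = some k) : PySem.List.pySetD d i x = d.set k x := by
  simp [PySem.List.pySetD, PySem.List.pySet?, h]

theorem pvSetD_sum_lt {d : List Nat} {v : Int} {x : Nat}
    (h : x < PySem.List.pyGetD d v 0) : (PySem.List.pySetD d v x).sum < d.sum := by
  rcases hx : PySem.List.pyIdx? d.length v with _ | k
  · rw [pvGetD_none hx] at h; omega
  · have hk := pvIdx_lt hx
    rw [pvSetD_some hx]
    rw [pvGetD_some hx, List.getD_eq_getElem d 0 hk] at h
    exact pvSumSet_lt d k x hk h

-- generic: a fold of steps that each either leave the state alone or strictly lower the dist sum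
theorem pvFoldStep {α : Type} (step : (List Nat × α) → Int → (List Nat × α))
    (hstep : ∀ s v, step s v = s ∨ (step s v).1.sum < s.1.sum) :
    ∀ (vs : List Int) (s : List Nat × α),
      vs.foldl step s = s ∨ (vs.foldl step s).1.sum < s.1.sum := by
  intro vs
  induction vs with
  | nil => intro s; left; rfl
  | cons v vs ih =>
    intro s
    simp only [List.foldl_cons]
    rcases hstep s v with h | h
    · rw [h]; exact ih s
    · rcases ih (step s v) with h2 | h2
      · rw [h2]; right; exact h
      · right; omega

-- ===== PORT A =====
-- adj[a].append(b); adj[b].append(a)   (int() is the identity on the int entries)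
def pvEdgeAddA (adj : List (List Int)) (e : List Int) : List (List Int) :=
  let a := PySem.List.pyGetD e 0 0
  let b := PySem.List.pyGetD e 1 0
  let adj1 := PySem.List.pySetD adj a (PySem.List.pyGetD adj a [] ++ [b])
  PySem.List.pySetD adj1 b (PySem.List.pyGetD adj1 b [] ++ [a])

-- 'if dist[v] > dist[u] + 1: dist[v] = dist[u] + 1; q.append(v)'
def pvStepA (u : Int) (s : List Nat × List Int) (v : Int) : List Nat × List Int :=
  if PySem.List.pyGetD s.1 v 0 > PySem.List.pyGetD s.1 u 0 + 1 then
    (PySem.List.pySetD s.1 v (PySem.List.pyGetD s.1 u 0 + 1), s.2 ++ [v])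
  else s

-- the inner 'for v in adj[u]' of _bfs
def pvRelaxA (adj : List (List Int)) (u : Int) (s : List Nat × List Int) : List Nat × List Int :=
  (PySem.List.pyGetD adj u []).foldl (pvStepA u) s

theorem pvStepA_dec (u : Int) (s : List Nat × List Int) (v : Int) :
    pvStepA u s v = s ∨ (pvStepA u s v).1.sum < s.1.sum := by
  unfold pvStepA
  split_ifs with h
  · right; exact pvSetD_sum_lt h
  · left; rfl

theorem pvRelaxA_dec (adj : List (List Int)) (u : Int) (d : List Nat) (q : List Int) :
    pvRelaxA adj u (d, q) = (d, q) ∨ (pvRelaxA adj u (d, q)).1.sum < d.sum :=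
  pvFoldStep (pvStepA u) (pvStepA_dec u) _ _

-- the 'while q' loop of _bfs (popleft, relax, pushed neighbours behind the remaining queue)
def pvBfsA (adj : List (List Int)) (q : List Int) (dist : List Nat) : List Nat :=
  match q with
  | [] => dist
  | u :: rest =>
    let s := pvRelaxA adj u (dist, rest)
    pvBfsA adj s.2 s.1
termination_by (dist.sum, q.length)
decreasing_by
  rcases pvRelaxA_dec adj u dist rest with h | h
  · rw [h]; exact Prod.Lex.right _ (by simp)
  · exact Prod.Lex.left _ _ h

def assign_factions_bfs (archs : List (List (String × Int))) (plateau_edges : List (List Int)) (reach_arch : Int) (lattice_arch : Int) : List String × List (List Int) :=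
  let N := archs.length
  let adj := plateau_edges.foldl pvEdgeAddA (List.replicate N [])
  let dist_r0 := PySem.List.pySetD (List.replicate N (999 : Nat)) reach_arch 0
  let dist_l0 := PySem.List.pySetD (List.replicate N (999 : Nat)) lattice_arch 0
  let dist_r := pvBfsA adj [reach_arch] dist_r0
  let dist_l := pvBfsA adj [lattice_arch] dist_l0
  ((PySem.List.pyRange 0 (N : Int) 1).map
      (fun i => if PySem.List.pyGetD dist_r i 0 ≤ PySem.List.pyGetD dist_l i 0 then "reach" else "lattice"),
   adj)

-- ===== PORT B =====
-- B builds adj the same way; the distance computation is Bellman-Ford sweeps, no queue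
def pvEdgeAddB (adj : List (List Int)) (e : List Int) : List (List Int) :=
  let a := PySem.List.pyGetD e 0 0
  let b := PySem.List.pyGetD e 1 0
  let adj1 := PySem.List.pySetD adj a (PySem.List.pyGetD adj a [] ++ [b])
  PySem.List.pySetD adj1 b (PySem.List.pyGetD adj1 b [] ++ [a])

-- 'if dist[u] + 1 < dist[v]: dist[v] = dist[u] + 1; changed = True'
def pvInnerB (u : Int) (s : List Nat × Bool) (v : Int) : List Nat × Bool :=
  if PySem.List.pyGetD s.1 u 0 + 1 < PySem.List.pyGetD s.1 v 0 then
    (PySem.List.pySetD s.1 v (PySem.List.pyGetD s.1 u 0 + 1), true)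
  else s

-- 'for v in adj[u]: …' for one u of the sweep
def pvSweepB (adj : List (List Int)) (s : List Nat × Bool) (u : Int) : List Nat × Bool :=
  (PySem.List.pyGetD adj u []).foldl (pvInnerB u) s

-- one full sweep 'changed = False; for u in range(N): …'
def pvPassB (N : Nat) (adj : List (List Int)) (d : List Nat) : List Nat × Bool :=
  (PySem.List.pyRange 0 (N : Int) 1).foldl (pvSweepB adj) (d, false)

theorem pvInnerB_dec (u : Int) (s : List Nat × Bool) (v : Int) :
    pvInnerB u s v = s ∨ (pvInnerB u s v).1.sum < s.1.sum := by
  unfold pvInnerB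
  split_ifs with h
  · right; exact pvSetD_sum_lt h
  · left; rfl

theorem pvSweepB_dec (adj : List (List Int)) (s : List Nat × Bool) (u : Int) :
    pvSweepB adj s u = s ∨ (pvSweepB adj s u).1.sum < s.1.sum :=
  pvFoldStep (pvInnerB u) (pvInnerB_dec u) _ _

theorem pvPassB_dec (N : Nat) (adj : List (List Int)) (d : List Nat)
    (h : (pvPassB N adj d).2 = true) : (pvPassB N adj d).1.sum < d.sum := by
  rcases pvFoldStep (pvSweepB adj) (pvSweepB_dec adj) (PySem.List.pyRange 0 (N : Int) 1) (d, false) with h2 | h2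
  · rw [pvPassB] at h; rw [h2] at h; simp at h
  · exact h2

-- 'while changed: …' as recursion on the sweep result
def pvLoopB (N : Nat) (adj : List (List Int)) (d : List Nat) : List Nat :=
  let s := pvPassB N adj d
  if _h : s.2 = true then pvLoopB N adj s.1 else s.1
termination_by d.sum
decreasing_by exact pvPassB_dec N adj d _h

def pvBfDistsB (N : Nat) (adj : List (List Int)) (start : Int) : List Nat :=
  pvLoopB N adj (PySem.List.pySetD (List.replicate N (999 : Nat)) start 0)

def assign_factions_bfs_alt (archs : List (List (String × Int))) (plateau_edges : List (List Int)) (reach_arch : Int) (lattice_arch : Int) : List String × List (List Int) :=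
  let N := archs.length
  let adj := plateau_edges.foldl pvEdgeAddB (List.replicate N [])
  let dist_r := pvBfDistsB N adj reach_arch
  let dist_l := pvBfDistsB N adj lattice_arch
  ((PySem.List.pyRange 0 (N : Int) 1).map
      (fun i => if PySem.List.pyGetD dist_r i 0 ≤ PySem.List.pyGetD dist_l i 0 then "reach" else "lattice"),
   adj)

-- ===== PRECONDITION & SPEC =====
-- A raises IndexError when an edge has fewer than two entries, or when an edge endpoint or one of
-- the two source indices lies outside [-N, N); Pre_ excludes exactly those inputs (negative
-- in-range indices wrap identically in A and B and stay inside Pre_).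
def Pre_assign_factions_bfs (archs : List (List (String × Int))) (plateau_edges : List (List Int)) (reach_arch : Int) (lattice_arch : Int) : Prop :=
  (∀ e ∈ plateau_edges, 2 ≤ e.length ∧
      PySem.Raise.InRange archs.length (e.getD 0 0) ∧
      PySem.Raise.InRange archs.length (e.getD 1 0)) ∧
  PySem.Raise.InRange archs.length reach_arch ∧
  PySem.Raise.InRange archs.length lattice_arch
instance (archs : List (List (String × Int))) (plateau_edges : List (List Int)) (reach_arch : Int) (lattice_arch : Int) : Decidable (Pre_assign_factions_bfs archs plateau_edges reach_arch lattice_arch) := by unfold Pre_assign_factions_bfs; infer_instance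

def pvWitness_assign_factions_bfs : (List (List (String × Int))) × List (List Int) × Int × Int :=
  ([[], [], []], [[0, 1], [1, 2]], 0, 2)

def Spec_assign_factions_bfs (archs : List (List (String × Int))) (plateau_edges : List (List Int)) (reach_arch : Int) (lattice_arch : Int) (out : List String × List (List Int)) : Prop := out = assign_factions_bfs_alt archs plateau_edges reach_arch lattice_arch
instance (archs : List (List (String × Int))) (plateau_edges : List (List Int)) (reach_arch : Int) (lattice_arch : Int) (out : List String × List (List Int)) : Decidable (Spec_assign_factions_bfs archs plateau_edges reach_arch lattice_arch out) := by unfold Spec_assign_factions_bfs; infer_instance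

-- ===== CLAIM (what is proved, stated in full; the proofs are below) =====
def Claim_equal_assign_factions_bfs : Prop := ∀ (archs : List (List (String × Int))) (plateau_edges : List (List Int)) (reach_arch : Int) (lattice_arch : Int), Dom_assign_factions_bfs archs plateau_edges reach_arch lattice_arch → Pre_assign_factions_bfs archs plateau_edges reach_arch lattice_arch → Spec_assign_factions_bfs archs plateau_edges reach_arch lattice_arch (assign_factions_bfs archs plateau_edges reach_arch lattice_arch)

-- ===== LEMMAS AND PROOFS =====

theorem pvWitness_ok : Dom_assign_factions_bfs pvWitness_assign_factions_bfs.1 pvWitness_assign_factions_bfs.2.1 pvWitness_assign_factions_bfs.2.2.1 pvWitness_assign_factions_bfs.2.2.2 ∧ Pre_assign_factions_bfs pvWitness_assign_factions_bfs.1 pvWitness_assign_factions_bfs.2.1 pvWitness_assign_factions_bfs.2.2.1 pvWitness_assign_factions_bfs.2.2.2 := by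
  constructor <;> decide

-- ---- small index/array facts ----

theorem pvSetD_none {α : Type} {d : List α} {x : α} {i : Int}
    (h : PySem.List.pyIdx? d.length i = none) : PySem.List.pySetD d i x = d := by
  simp [PySem.List.pySetD, PySem.List.pySet?, h]

theorem pvIdx_natCast {n k : Nat} (h : k < n) : PySem.List.pyIdx? n (k : Int) = some k := by
  unfold PySem.List.pyIdx?
  split_ifs <;> simp_all

theorem pvG_canon {α : Type} {d : List α} {x : α} {i j : Int}
    (h : PySem.List.pyIdx? d.length i = PySem.List.pyIdx? d.length j) :
    PySem.List.pyGetD d i x = PySem.List.pyGetD d j x := by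
  rcases hj : PySem.List.pyIdx? d.length j with _ | k
  · rw [pvGetD_none (h.trans hj), pvGetD_none hj]
  · rw [pvGetD_some (h.trans hj), pvGetD_some hj]

theorem pvGetD_set_self (d : List Nat) (k : Nat) (x : Nat) (h : k < d.length) :
    (d.set k x).getD k 0 = x := by
  rw [List.getD_eq_getElem _ _ (by simpa using h)]
  simp

theorem pvGetD_set_ne (d : List Nat) (k k' : Nat) (x : Nat) (h : k' ≠ k) :
    (d.set k x).getD k' 0 = d.getD k' 0 := by
  simp [List.getD, List.getElem?_set_ne (Ne.symm h)]

theorem pvIdx_set {d : List Nat} {k : Nat} {x : Nat} (j : Int) :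
    PySem.List.pyIdx? (d.set k x).length j = PySem.List.pyIdx? d.length j := by
  rw [List.length_set]

theorem pvG_set_eq {d : List Nat} {v j : Int} {k : Nat} (x : Nat)
    (hv : PySem.List.pyIdx? d.length v = some k) (hj : PySem.List.pyIdx? d.length j = some k) :
    PySem.List.pyGetD (PySem.List.pySetD d v x) j 0 = x := by
  rw [pvSetD_some hv, pvGetD_some (by rw [pvIdx_set]; exact hj)]
  exact pvGetD_set_self d k x (pvIdx_lt hv)

theorem pvG_set_other {d : List Nat} {v j : Int} {k : Nat} (x : Nat)
    (hv : PySem.List.pyIdx? d.length v = some k) (hj : PySem.List.pyIdx? d.length j ≠ some k) :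
    PySem.List.pyGetD (PySem.List.pySetD d v x) j 0 = PySem.List.pyGetD d j 0 := by
  rw [pvSetD_some hv]
  rcases hj' : PySem.List.pyIdx? d.length j with _ | k'
  · rw [pvGetD_none (by rw [pvIdx_set]; exact hj'), pvGetD_none hj']
  · rw [pvGetD_some (by rw [pvIdx_set]; exact hj'), pvGetD_some hj']
    exact pvGetD_set_ne d k k' x (by intro hEq; exact hj (by rw [hj', hEq]))

-- ---- the relaxation system both programs iterate ----

def pvFix (adj : List (List Int)) (d : List Nat) : Prop :=
  ∀ u v : Int, v ∈ PySem.List.pyGetD adj u [] →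
    PySem.List.pyGetD d v 0 ≤ PySem.List.pyGetD d u 0 + 1

def pvLe (f d : List Nat) : Prop :=
  ∀ i : Int, PySem.List.pyGetD f i 0 ≤ PySem.List.pyGetD d i 0

-- the shared dist-component of one conditional relax write
def pvRelax1 (u : Int) (d : List Nat) (v : Int) : List Nat :=
  if PySem.List.pyGetD d u 0 + 1 < PySem.List.pyGetD d v 0 then
    PySem.List.pySetD d v (PySem.List.pyGetD d u 0 + 1)
  else d

theorem pvStepA_fst (u : Int) (s : List Nat × List Int) (v : Int) :
    (pvStepA u s v).1 = pvRelax1 u s.1 v := by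
  unfold pvStepA pvRelax1
  split_ifs <;> rfl

theorem pvInnerB_fst (u : Int) (s : List Nat × Bool) (v : Int) :
    (pvInnerB u s v).1 = pvRelax1 u s.1 v := by
  unfold pvInnerB pvRelax1
  split_ifs <;> rfl

theorem pvRelax1_len (u : Int) (d : List Nat) (v : Int) :
    (pvRelax1 u d v).length = d.length := by
  unfold pvRelax1
  split_ifs <;> simp [PySem.List.length_pySetD]

theorem pvRelax1_le (u : Int) (d : List Nat) (v : Int) (j : Int) :
    PySem.List.pyGetD (pvRelax1 u d v) j 0 ≤ PySem.List.pyGetD d j 0 := by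
  unfold pvRelax1
  split_ifs with h
  · rcases hv : PySem.List.pyIdx? d.length v with _ | k
    · rw [pvSetD_none hv]
    · by_cases hj : PySem.List.pyIdx? d.length j = some k
      · rw [pvG_set_eq _ hv hj]
        have := pvG_canon (d := d) (x := 0) (hj.trans hv.symm)
        omega
      · rw [pvG_set_other _ hv hj]
  · exact le_refl _

theorem pvRelax1_ghost (u : Int) (d f : List Nat) (v : Int)
    (hlen : f.length = d.length) (hfv : PySem.List.pyGetD f v 0 ≤ PySem.List.pyGetD f u 0 + 1)
    (hle : pvLe f d) : pvLe f (pvRelax1 u d v) := by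
  unfold pvRelax1
  split_ifs with h
  · intro j
    rcases hv : PySem.List.pyIdx? d.length v with _ | k
    · rw [pvSetD_none hv]; exact hle j
    · by_cases hj : PySem.List.pyIdx? d.length j = some k
      · rw [pvG_set_eq _ hv hj]
        have hfj : PySem.List.pyGetD f j 0 = PySem.List.pyGetD f v 0 := by
          apply pvG_canon; rw [hlen, hj, hv]
        have := hle u
        omega
      · rw [pvG_set_other _ hv hj]; exact hle j
  · exact hle

-- generic fold lifting of the two pointwise facts (applies to both ports' inner loops)
theorem pvDec_fold {α : Type} (step : (List Nat × α) → Int → (List Nat × α)) (u : Int)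
    (hstep : ∀ s v, (step s v).1 = pvRelax1 u s.1 v) :
    ∀ (vs : List Int) (s : List Nat × α),
      (∀ j : Int, PySem.List.pyGetD (vs.foldl step s).1 j 0 ≤ PySem.List.pyGetD s.1 j 0) ∧
      (vs.foldl step s).1.length = s.1.length := by
  intro vs
  induction vs with
  | nil => intro s; exact ⟨fun j => le_refl _, rfl⟩
  | cons v vs ih =>
    intro s
    simp only [List.foldl_cons]
    obtain ⟨ihle, ihlen⟩ := ih (step s v)
    refine ⟨fun j => le_trans (ihle j) ?_, by rw [ihlen, hstep, pvRelax1_len]⟩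
    rw [hstep]; exact pvRelax1_le u s.1 v j

theorem pvGhost_fold {α : Type} (step : (List Nat × α) → Int → (List Nat × α)) (u : Int)
    (hstep : ∀ s v, (step s v).1 = pvRelax1 u s.1 v) (f : List Nat) :
    ∀ (vs : List Int) (s : List Nat × α), f.length = s.1.length →
      (∀ v ∈ vs, PySem.List.pyGetD f v 0 ≤ PySem.List.pyGetD f u 0 + 1) →
      pvLe f s.1 → pvLe f (vs.foldl step s).1 := by
  intro vs
  induction vs with
  | nil => intro s _ _ hle; exact hle
  | cons v vs ih =>
    intro s hlen hvs hle
    simp only [List.foldl_cons]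
    apply ih (step s v)
    · rw [hstep, pvRelax1_len]; exact hlen
    · exact fun w hw => hvs w (List.mem_cons_of_mem _ hw)
    · rw [hstep]
      exact pvRelax1_ghost u s.1 f v hlen (hvs v List.mem_cons_self) hle

-- ---- A side: the final queue-BFS state is a fixpoint ----

-- facts about A's inner relaxation fold: length kept, entries only decrease, dist[u] untouched,
-- the queue grows at the back and every changed cell has a witness among the pushed nodes,
-- and every scanned neighbour ends up satisfied
theorem pvFoldA_facts (u : Int) :
    ∀ (vs : List Int) (d : List Nat) (q : List Int),
      ((vs.foldl (pvStepA u) (d, q)).1.length = d.length) ∧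
      (∀ j : Int, PySem.List.pyGetD (vs.foldl (pvStepA u) (d, q)).1 j 0 ≤ PySem.List.pyGetD d j 0) ∧
      (PySem.List.pyGetD (vs.foldl (pvStepA u) (d, q)).1 u 0 = PySem.List.pyGetD d u 0) ∧
      (∃ new, (vs.foldl (pvStepA u) (d, q)).2 = q ++ new ∧
        ∀ j : Int, PySem.List.pyGetD (vs.foldl (pvStepA u) (d, q)).1 j 0 = PySem.List.pyGetD d j 0 ∨
          ∃ v' ∈ new, PySem.List.pyIdx? d.length v' = PySem.List.pyIdx? d.length j) ∧
      (∀ v ∈ vs, PySem.List.pyGetD (vs.foldl (pvStepA u) (d, q)).1 v 0 ≤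
        PySem.List.pyGetD (vs.foldl (pvStepA u) (d, q)).1 u 0 + 1) := by
  intro vs
  induction vs with
  | nil =>
    intro d q
    exact ⟨rfl, fun j => le_refl _, rfl, ⟨[], by simp⟩, by simp⟩
  | cons v vs ih =>
    intro d q
    simp only [List.foldl_cons]
    by_cases hc : PySem.List.pyGetD d v 0 > PySem.List.pyGetD d u 0 + 1
    · -- write branch
      have hstep : pvStepA u (d, q) v =
          (PySem.List.pySetD d v (PySem.List.pyGetD d u 0 + 1), q ++ [v]) := by
        simp [pvStepA, hc]
      rw [hstep]
      set x := PySem.List.pyGetD d u 0 + 1 with hx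
      set d1 := PySem.List.pySetD d v x with hd1
      rcases hv : PySem.List.pyIdx? d.length v with _ | kv
      · exfalso; rw [pvGetD_none hv] at hc; omega
      have hd1len : d1.length = d.length := by rw [hd1, PySem.List.length_pySetD]
      have hG1u : PySem.List.pyGetD d1 u 0 = PySem.List.pyGetD d u 0 := by
        by_cases hu : PySem.List.pyIdx? d.length u = some kv
        · exfalso
          have : PySem.List.pyGetD d u 0 = PySem.List.pyGetD d v 0 :=
            pvG_canon (by rw [hu, hv])
          omega
        · exact pvG_set_other x hv hu
      have hdec1 : ∀ j : Int, PySem.List.pyGetD d1 j 0 ≤ PySem.List.pyGetD d j 0 := by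
        intro j
        by_cases hj : PySem.List.pyIdx? d.length j = some kv
        · rw [pvG_set_eq x hv hj]
          have : PySem.List.pyGetD d j 0 = PySem.List.pyGetD d v 0 :=
            pvG_canon (by rw [hj, hv])
          omega
        · rw [pvG_set_other x hv hj]
      have hch1 : ∀ j : Int, PySem.List.pyGetD d1 j 0 = PySem.List.pyGetD d j 0 ∨
          PySem.List.pyIdx? d.length j = PySem.List.pyIdx? d.length v := by
        intro j
        by_cases hj : PySem.List.pyIdx? d.length j = some kv
        · right; rw [hj, hv]
        · left; exact pvG_set_other x hv hj
      have hG1v : PySem.List.pyGetD d1 v 0 = x := pvG_set_eq x hv hv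
      obtain ⟨ihlen, ihdec, ihu, ⟨new1, ihq, ihch⟩, ihproc⟩ := ih d1 (q ++ [v])
      refine ⟨ihlen.trans hd1len, ?_, ?_, ⟨v :: new1, ?_, ?_⟩, ?_⟩
      · exact fun j => le_trans (ihdec j) (hdec1 j)
      · exact ihu.trans hG1u
      · rw [ihq]; simp
      · intro j
        rcases ihch j with hEq | ⟨v', hv', hcan⟩
        · rcases hch1 j with hEq1 | hcan1
          · left; exact hEq.trans hEq1
          · right; exact ⟨v, List.mem_cons_self, hcan1.symm⟩
        · right
          refine ⟨v', List.mem_cons_of_mem _ hv', ?_⟩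
          rw [hd1len] at hcan; exact hcan
      · intro w hw
        rcases List.mem_cons.mp hw with hEq | hmem
        · subst hEq
          have := ihdec w
          rw [hG1v] at this
          rw [ihu.trans hG1u]
          omega
        · exact ihproc w hmem
    · -- no write
      have hstep : pvStepA u (d, q) v = (d, q) := by simp [pvStepA, hc]
      rw [hstep]
      obtain ⟨ihlen, ihdec, ihu, hnew, ihproc⟩ := ih d q
      refine ⟨ihlen, ihdec, ihu, hnew, ?_⟩
      intro w hw
      rcases List.mem_cons.mp hw with hEq | hmem
      · subst hEq
        have h1 := ihdec w
        rw [ihu]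
        omega
      · exact ihproc w hmem

-- the queue invariant: every violated relaxation has a queued witness with the same canonical index
def pvInv (adj : List (List Int)) (d : List Nat) (q : List Int) : Prop :=
  ∀ u v : Int, v ∈ PySem.List.pyGetD adj u [] →
    PySem.List.pyGetD d v 0 ≤ PySem.List.pyGetD d u 0 + 1 ∨
    ∃ u' ∈ q, PySem.List.pyIdx? adj.length u' = PySem.List.pyIdx? adj.length u

theorem pvBfsA_fix (adj : List (List Int)) (q : List Int) (d : List Nat)
    (hlen : d.length = adj.length) (hinv : pvInv adj d q) :
    (pvBfsA adj q d).length = adj.length ∧ pvFix adj (pvBfsA adj q d) ∧ pvLe (pvBfsA adj q d) d := by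
  match q with
  | [] =>
    rw [pvBfsA]
    refine ⟨hlen, ?_, fun i => le_refl _⟩
    intro u v hv
    rcases hinv u v hv with h | ⟨u', hu', _⟩
    · exact h
    · simp at hu'
  | u :: rest =>
    rw [pvBfsA]
    obtain ⟨flen, fdec, fu, ⟨new, fq, fch⟩, fproc⟩ :=
      pvFoldA_facts u (PySem.List.pyGetD adj u []) d rest
    have hlen' : (pvRelaxA adj u (d, rest)).1.length = adj.length := by
      rw [pvRelaxA, flen, hlen]
    have hinv' : pvInv adj (pvRelaxA adj u (d, rest)).1 (pvRelaxA adj u (d, rest)).2 := by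
      intro u0 v0 hv0
      rw [pvRelaxA] at *
      by_cases hcu : PySem.List.pyIdx? adj.length u0 = PySem.List.pyIdx? adj.length u
      · left
        have hadj : PySem.List.pyGetD adj u0 ([] : List Int) = PySem.List.pyGetD adj u [] :=
          pvG_canon hcu
        have hmem : v0 ∈ PySem.List.pyGetD adj u [] := by rw [← hadj]; exact hv0
        have h1 := fproc v0 hmem
        have hGu : PySem.List.pyGetD ((PySem.List.pyGetD adj u []).foldl (pvStepA u) (d, rest)).1 u0 0 =
            PySem.List.pyGetD ((PySem.List.pyGetD adj u []).foldl (pvStepA u) (d, rest)).1 u 0 := by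
          apply pvG_canon
          rw [flen, hlen]
          exact hcu
        omega
      · rcases hinv u0 v0 hv0 with hle0 | ⟨u', hu', hcan'⟩
        · rcases fch u0 with hEq | ⟨v', hv', hcan⟩
          · left
            have h1 := fdec v0
            rw [hEq]
            omega
          · right
            refine ⟨v', ?_, ?_⟩
            · rw [fq]; exact List.mem_append_right _ hv'
            · rw [← hlen]; exact hcan
        · rcases List.mem_cons.mp hu' with hEq | hmem
          · exfalso; subst hEq; exact hcu hcan'.symm
          · right
            exact ⟨u', by rw [fq]; exact List.mem_append_left _ hmem, hcan'⟩
    obtain ⟨rlen, rfix, rle⟩ := pvBfsA_fix adj (pvRelaxA adj u (d, rest)).2 (pvRelaxA adj u (d, rest)).1 hlen' hinv'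
    refine ⟨rlen, rfix, ?_⟩
    intro i
    have h1 := rle i
    have h2 := fdec i
    rw [pvRelaxA] at h1 ⊢
    omega
termination_by (d.sum, q.length)
decreasing_by
  rcases pvRelaxA_dec adj u d rest with h | h
  · rw [h]; exact Prod.Lex.right _ (by simp)
  · exact Prod.Lex.left _ _ h

-- ghost invariant for A: any fixpoint below the state stays below through the whole BFS
theorem pvBfsA_ghost (adj : List (List Int)) (f : List Nat) (hf : pvFix adj f)
    (q : List Int) (d : List Nat) (hlen : f.length = d.length) (hle : pvLe f d) :
    pvLe f (pvBfsA adj q d) := by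
  match q with
  | [] => rw [pvBfsA]; exact hle
  | u :: rest =>
    rw [pvBfsA]
    obtain ⟨flen, _, _, _, _⟩ := pvFoldA_facts u (PySem.List.pyGetD adj u []) d rest
    have hghost : pvLe f (pvRelaxA adj u (d, rest)).1 := by
      rw [pvRelaxA]
      exact pvGhost_fold (pvStepA u) u (pvStepA_fst u) f _ (d, rest) hlen
        (fun v hv => hf u v hv) hle
    exact pvBfsA_ghost adj f hf (pvRelaxA adj u (d, rest)).2 (pvRelaxA adj u (d, rest)).1
      (by rw [pvRelaxA, flen]; exact hlen) hghost
termination_by (d.sum, q.length)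
decreasing_by
  rcases pvRelaxA_dec adj u d rest with h | h
  · rw [h]; exact Prod.Lex.right _ (by simp)
  · exact Prod.Lex.left _ _ h

-- ---- B side: the final sweep state is a fixpoint ----

theorem pvFlag_true (step : (List Nat × Bool) → Int → (List Nat × Bool))
    (hstep : ∀ s v, step s v = s ∨ (step s v).2 = true) :
    ∀ (vs : List Int) (s : List Nat × Bool), s.2 = true → (vs.foldl step s).2 = true := by
  intro vs
  induction vs with
  | nil => intro s h; exact h
  | cons v vs ih =>
    intro s h
    simp only [List.foldl_cons]
    apply ih
    rcases hstep s v with h2 | h2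
    · rw [h2]; exact h
    · exact h2

theorem pvFold_false (step : (List Nat × Bool) → Int → (List Nat × Bool))
    (hstep : ∀ s v, step s v = s ∨ (step s v).2 = true) :
    ∀ (vs : List Int) (d : List Nat), (vs.foldl step (d, false)).2 = false →
      vs.foldl step (d, false) = (d, false) ∧ ∀ v ∈ vs, step (d, false) v = (d, false) := by
  intro vs
  induction vs with
  | nil => intro d _; exact ⟨rfl, by simp⟩
  | cons v vs ih =>
    intro d h
    simp only [List.foldl_cons] at h ⊢
    have hsv : step (d, false) v = (d, false) := by
      rcases hstep (d, false) v with h2 | h2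
      · exact h2
      · exfalso
        have h3 : (vs.foldl step (step (d, false) v)).2 = true :=
          pvFlag_true step hstep vs _ h2
        rw [h3] at h; simp at h
    rw [hsv] at h ⊢
    obtain ⟨h1, h2⟩ := ih d h
    refine ⟨h1, ?_⟩
    intro w hw
    rcases List.mem_cons.mp hw with hEq | hmem
    · subst hEq; exact hsv
    · exact h2 w hmem

theorem pvInnerB_id_or_true (u : Int) (s : List Nat × Bool) (v : Int) :
    pvInnerB u s v = s ∨ (pvInnerB u s v).2 = true := by
  unfold pvInnerB; split_ifs <;> simp

theorem pvSweepB_id_or_true (adj : List (List Int)) (s : List Nat × Bool) (u : Int) :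
    pvSweepB adj s u = s ∨ (pvSweepB adj s u).2 = true := by
  unfold pvSweepB
  generalize PySem.List.pyGetD adj u ([] : List Int) = vs
  induction vs generalizing s with
  | nil => left; rfl
  | cons v vs ih =>
    simp only [List.foldl_cons]
    rcases pvInnerB_id_or_true u s v with h | h
    · rw [h]; exact ih s
    · right
      exact pvFlag_true (pvInnerB u) (pvInnerB_id_or_true u) vs _ h

theorem pvInnerB_sat (u : Int) (d : List Nat) (v : Int)
    (h : pvInnerB u (d, false) v = (d, false)) :
    PySem.List.pyGetD d v 0 ≤ PySem.List.pyGetD d u 0 + 1 := by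
  by_cases hc : PySem.List.pyGetD d u 0 + 1 < PySem.List.pyGetD d v 0
  · exfalso
    have : (pvInnerB u (d, false) v).2 = true := by simp [pvInnerB, hc]
    rw [h] at this; simp at this
  · omega

theorem pvPassB_false (N : Nat) (adj : List (List Int)) (d : List Nat)
    (h : (pvPassB N adj d).2 = false) :
    (pvPassB N adj d).1 = d ∧
    ∀ u : Int, 0 ≤ u → u < (N : Int) →
      ∀ v ∈ PySem.List.pyGetD adj u [],
        PySem.List.pyGetD d v 0 ≤ PySem.List.pyGetD d u 0 + 1 := by
  rw [pvPassB] at *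
  obtain ⟨h1, h2⟩ := pvFold_false (pvSweepB adj) (pvSweepB_id_or_true adj) _ d h
  refine ⟨by rw [h1], ?_⟩
  intro u hu0 huN v hv
  have humem : u ∈ PySem.List.pyRange 0 (N : Int) 1 :=
    (PySem.List.mem_pyRange_one).mpr ⟨hu0, huN⟩
  have hsweep := h2 u humem
  rw [pvSweepB] at hsweep
  obtain ⟨_, h4⟩ := pvFold_false (pvInnerB u) (pvInnerB_id_or_true u)
    (PySem.List.pyGetD adj u []) d (by rw [hsweep])
  exact pvInnerB_sat u d v (h4 v hv)

theorem pvSweepB_decLe (adj : List (List Int)) (s : List Nat × Bool) (u : Int) :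
    (∀ j : Int, PySem.List.pyGetD (pvSweepB adj s u).1 j 0 ≤ PySem.List.pyGetD s.1 j 0) ∧
    (pvSweepB adj s u).1.length = s.1.length := by
  rw [pvSweepB]
  exact pvDec_fold (pvInnerB u) u (pvInnerB_fst u) _ s

theorem pvOuterDec (adj : List (List Int)) :
    ∀ (us : List Int) (s : List Nat × Bool),
      (∀ j : Int, PySem.List.pyGetD (us.foldl (pvSweepB adj) s).1 j 0 ≤ PySem.List.pyGetD s.1 j 0) ∧
      (us.foldl (pvSweepB adj) s).1.length = s.1.length := by
  intro us
  induction us with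
  | nil => intro s; exact ⟨fun j => le_refl _, rfl⟩
  | cons u us ih =>
    intro s
    simp only [List.foldl_cons]
    obtain ⟨sdec, slen⟩ := pvSweepB_decLe adj s u
    obtain ⟨ihdec, ihlen⟩ := ih (pvSweepB adj s u)
    exact ⟨fun j => le_trans (ihdec j) (sdec j), ihlen.trans slen⟩

theorem pvPassB_decLe (N : Nat) (adj : List (List Int)) (d : List Nat) :
    (∀ j : Int, PySem.List.pyGetD (pvPassB N adj d).1 j 0 ≤ PySem.List.pyGetD d j 0) ∧
    (pvPassB N adj d).1.length = d.length := by
  rw [pvPassB]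
  exact pvOuterDec adj _ (d, false)

theorem pvOuterGhost (adj : List (List Int)) (f : List Nat) (hf : pvFix adj f) :
    ∀ (us : List Int) (s : List Nat × Bool), f.length = s.1.length →
      pvLe f s.1 → pvLe f (us.foldl (pvSweepB adj) s).1 := by
  intro us
  induction us with
  | nil => intro s _ hle; exact hle
  | cons u us ih =>
    intro s hlen hle
    simp only [List.foldl_cons]
    obtain ⟨_, slen⟩ := pvSweepB_decLe adj s u
    apply ih (pvSweepB adj s u) (by rw [slen]; exact hlen)
    rw [pvSweepB]
    exact pvGhost_fold (pvInnerB u) u (pvInnerB_fst u) f _ s hlen (fun v hv => hf u v hv) hle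

theorem pvLoopB_fix (N : Nat) (adj : List (List Int)) (hNadj : adj.length = N)
    (d : List Nat) (hlen : d.length = N) :
    (pvLoopB N adj d).length = N ∧ pvFix adj (pvLoopB N adj d) ∧ pvLe (pvLoopB N adj d) d := by
  rw [pvLoopB]
  by_cases h : (pvPassB N adj d).2 = true
  · simp only [dif_pos h]
    obtain ⟨pdec, plen⟩ := pvPassB_decLe N adj d
    obtain ⟨rlen, rfix, rle⟩ := pvLoopB_fix N adj hNadj (pvPassB N adj d).1 (by rw [plen, hlen])
    exact ⟨rlen, rfix, fun i => le_trans (rle i) (pdec i)⟩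
  · simp only [dif_neg h]
    obtain ⟨h1, h2⟩ := pvPassB_false N adj d (by simpa using h)
    rw [h1]
    refine ⟨hlen, ?_, fun i => le_refl _⟩
    intro u v hv
    rcases hu : PySem.List.pyIdx? adj.length u with _ | k
    · exfalso
      rw [pvGetD_none hu] at hv
      simp at hv
    · have hk : k < N := by rw [← hNadj]; exact pvIdx_lt hu
      have hcan : PySem.List.pyIdx? adj.length u = PySem.List.pyIdx? adj.length (k : Int) := by
        rw [hu, hNadj, pvIdx_natCast hk]
      have hadj : PySem.List.pyGetD adj u ([] : List Int) = PySem.List.pyGetD adj (k : Int) [] :=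
        pvG_canon hcan
      have hGd : PySem.List.pyGetD d u 0 = PySem.List.pyGetD d (k : Int) 0 :=
        pvG_canon (by rw [hlen, ← hNadj]; exact hcan)
      rw [hGd]
      apply h2 (k : Int) (by positivity) (by exact_mod_cast hk)
      rw [← hadj]; exact hv
termination_by d.sum
decreasing_by exact pvPassB_dec N adj d h

theorem pvLoopB_ghost (N : Nat) (adj : List (List Int)) (f : List Nat) (hf : pvFix adj f)
    (d : List Nat) (hlen : f.length = d.length) (hle : pvLe f d) :
    pvLe f (pvLoopB N adj d) := by
  rw [pvLoopB]
  by_cases h : (pvPassB N adj d).2 = true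
  · simp only [dif_pos h]
    obtain ⟨_, plen⟩ := pvPassB_decLe N adj d
    apply pvLoopB_ghost N adj f hf (pvPassB N adj d).1 (by rw [plen]; exact hlen)
    rw [pvPassB]
    exact pvOuterGhost adj f hf _ (d, false) hlen hle
  · simp only [dif_neg h]
    obtain ⟨h1, _⟩ := pvPassB_false N adj d (by simpa using h)
    rw [h1]; exact hle
termination_by d.sum
decreasing_by exact pvPassB_dec N adj d h

-- ---- assembly ----

theorem pvAdj_len : ∀ (edges : List (List Int)) (adj : List (List Int)),
    (edges.foldl pvEdgeAddA adj).length = adj.length := by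
  intro edges
  induction edges with
  | nil => intro adj; rfl
  | cons e t ih =>
    intro adj
    simp only [List.foldl_cons]
    rw [ih]
    simp [pvEdgeAddA, PySem.List.length_pySetD]

theorem pvEdgeAddB_eq : pvEdgeAddB = pvEdgeAddA := rfl

-- the initial distance array: all entries are ≤ 999, in range it is 999 off the start cell
theorem pvInit_le (N : Nat) (start : Int) (j : Int) :
    PySem.List.pyGetD (PySem.List.pySetD (List.replicate N (999 : Nat)) start 0) j 0 ≤ 999 := by
  set d0 := List.replicate N (999 : Nat) with hd0
  have hlen : d0.length = N := by rw [hd0, List.length_replicate]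
  rcases hs : PySem.List.pyIdx? d0.length start with _ | ks
  · rw [pvSetD_none hs]
    rcases hj : PySem.List.pyIdx? d0.length j with _ | kj
    · rw [pvGetD_none hj]; omega
    · rw [pvGetD_some hj, hd0, List.getD_eq_getElem _ _ (by simpa [hd0] using pvIdx_lt hj)]
      simp
  · by_cases hj : PySem.List.pyIdx? d0.length j = some ks
    · rw [pvG_set_eq 0 hs hj]; omega
    · rw [pvG_set_other 0 hs hj]
      rcases hj' : PySem.List.pyIdx? d0.length j with _ | kj
      · rw [pvGetD_none hj']; omega
      · rw [pvGetD_some hj', hd0, List.getD_eq_getElem _ _ (by simpa [hd0] using pvIdx_lt hj')]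
        simp

theorem pvInit_off (N : Nat) (start : Int) (j : Int)
    (hne : PySem.List.pyIdx? N j ≠ PySem.List.pyIdx? N start)
    (hjr : PySem.List.pyIdx? N j ≠ none) :
    PySem.List.pyGetD (PySem.List.pySetD (List.replicate N (999 : Nat)) start 0) j 0 = 999 := by
  set d0 := List.replicate N (999 : Nat) with hd0
  have hlen : d0.length = N := by rw [hd0, List.length_replicate]
  rcases hj : PySem.List.pyIdx? N j with _ | kj
  · exact absurd hj hjr
  have hval : PySem.List.pyGetD d0 j 0 = 999 := by
    rw [pvGetD_some (by rw [hlen]; exact hj), hd0,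
      List.getD_eq_getElem _ _ (by simpa using pvIdx_lt (n := N) hj)]
    simp
  rcases hs : PySem.List.pyIdx? N start with _ | ks
  · rw [pvSetD_none (by rw [hlen]; exact hs)]; exact hval
  · rw [pvG_set_other 0 (by rw [hlen]; exact hs) (by rw [hlen, hj]; intro hEq; apply hne; rw [hj, hs, hEq])]
    exact hval

theorem pvInv_init (adj : List (List Int)) (N : Nat) (hNadj : adj.length = N) (start : Int) :
    pvInv adj (PySem.List.pySetD (List.replicate N (999 : Nat)) start 0) [start] := by
  intro u v hv
  set d0 := PySem.List.pySetD (List.replicate N (999 : Nat)) start 0 with hd0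
  have hlen : d0.length = N := by rw [hd0, PySem.List.length_pySetD, List.length_replicate]
  by_cases hc : PySem.List.pyIdx? adj.length u = PySem.List.pyIdx? adj.length start
  · right; exact ⟨start, List.mem_singleton.mpr rfl, hc.symm⟩
  · left
    rcases hu : PySem.List.pyIdx? adj.length u with _ | ku
    · exfalso
      rw [pvGetD_none hu] at hv
      simp at hv
    · have hGu : PySem.List.pyGetD d0 u 0 = 999 := by
        rw [hd0]
        apply pvInit_off N start u
        · rw [← hNadj]; exact hc
        · rw [← hNadj, hu]; simp
      have hGv := pvInit_le N start v
      rw [← hd0] at hGv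
      rw [hGu]
      omega

-- chaotic iteration has a unique normal form: both programs' distance arrays coincide
theorem pvDists_eq (N : Nat) (adj : List (List Int)) (hNadj : adj.length = N) (start : Int) :
    pvBfsA adj [start] (PySem.List.pySetD (List.replicate N (999 : Nat)) start 0) =
    pvLoopB N adj (PySem.List.pySetD (List.replicate N (999 : Nat)) start 0) := by
  set d0 := PySem.List.pySetD (List.replicate N (999 : Nat)) start 0 with hd0
  have hd0len : d0.length = N := by rw [hd0, PySem.List.length_pySetD, List.length_replicate]
  obtain ⟨lenA, fixA, leA⟩ := pvBfsA_fix adj [start] d0 (by rw [hd0len, hNadj]) (pvInv_init adj N hNadj start)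
  obtain ⟨lenB, fixB, leB⟩ := pvLoopB_fix N adj hNadj d0 hd0len
  have hBA : pvLe (pvLoopB N adj d0) (pvBfsA adj [start] d0) :=
    pvBfsA_ghost adj (pvLoopB N adj d0) fixB [start] d0 (by rw [lenB, hd0len]) leB
  have hAB : pvLe (pvBfsA adj [start] d0) (pvLoopB N adj d0) :=
    pvLoopB_ghost N adj (pvBfsA adj [start] d0) fixA d0 (by rw [lenA, hNadj, hd0len]) leA
  apply List.ext_getElem
  · rw [lenA, lenB, hNadj]
  · intro k hk1 hk2
    have hkN : k < N := by rw [lenA, hNadj] at hk1; exact hk1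
    have hGA : PySem.List.pyGetD (pvBfsA adj [start] d0) (k : Int) 0 = (pvBfsA adj [start] d0)[k] := by
      rw [pvGetD_some (by rw [lenA, hNadj]; exact pvIdx_natCast hkN),
        List.getD_eq_getElem _ _ hk1]
    have hGB : PySem.List.pyGetD (pvLoopB N adj d0) (k : Int) 0 = (pvLoopB N adj d0)[k] := by
      rw [pvGetD_some (by rw [lenB]; exact pvIdx_natCast hkN),
        List.getD_eq_getElem _ _ hk2]
    have h1 := hBA (k : Int)
    have h2 := hAB (k : Int)
    omega

-- ===== VERDICT (by name: the statement is the Claim_ definition above) =====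
theorem assign_factions_bfs_spec : Claim_equal_assign_factions_bfs := by
  intro archs plateau_edges reach_arch lattice_arch _ _
  unfold Spec_assign_factions_bfs assign_factions_bfs assign_factions_bfs_alt
  simp only []
  rw [pvEdgeAddB_eq]
  set N := archs.length with hN
  set adj := plateau_edges.foldl pvEdgeAddA (List.replicate N []) with hadj
  have hNadj : adj.length = N := by rw [hadj, pvAdj_len, List.length_replicate]
  rw [pvBfDistsB, pvBfDistsB, ← pvDists_eq N adj hNadj reach_arch, ← pvDists_eq N adj hNadj lattice_arch]
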